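-- pv_equiv track=rewrite | github.com/pemponce/AiLowCurrentSystemIngeneer | proj/AiLowCurrentEngineerPy/app/nn3/infer.py | _clamp_to_bbox
-- ===== SOURCE A (Python) =====
-- def _clamp_to_bbox(px: int, py: int, poly: list, margin: int = 10):
--     """Ограничиваем координаты внутри bbox полигона с отступом."""
--     if not poly or len(poly) < 3:
--         return px, py
--     xs = [p[0] for p in poly]
--     ys = [p[1] for p in poly]
--     x0, x1 = min(xs) + margin, max(xs) - margin
--     y0, y1 = min(ys) + margin, max(ys) - margin
--     return int(max(x0, min(x1, px))), int(max(y0, min(y1, py)))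
-- ===== SOURCE B (Python) =====
-- def _clamp_to_bbox(px: int, py: int, poly: list, margin: int = 10):
--     """Sort each coordinate list once; the bbox is the sorted lists' endpoints."""
--     if not poly or len(poly) < 3:
--         return px, py
--     xs = sorted(p[0] for p in poly)
--     ys = sorted(p[1] for p in poly)
--     return max(xs[0] + margin, min(xs[-1] - margin, px)), max(ys[0] + margin, min(ys[-1] - margin, py))
-- ===== Notes on version B (the rewrite author's own statement) =====
-- stated objective: alternative
-- what changed: Replaces the four min/max extremal scans with sorting each coordinate list once and reading the bounding box off the sorted lists' first and last elements.
import Mathlib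
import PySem

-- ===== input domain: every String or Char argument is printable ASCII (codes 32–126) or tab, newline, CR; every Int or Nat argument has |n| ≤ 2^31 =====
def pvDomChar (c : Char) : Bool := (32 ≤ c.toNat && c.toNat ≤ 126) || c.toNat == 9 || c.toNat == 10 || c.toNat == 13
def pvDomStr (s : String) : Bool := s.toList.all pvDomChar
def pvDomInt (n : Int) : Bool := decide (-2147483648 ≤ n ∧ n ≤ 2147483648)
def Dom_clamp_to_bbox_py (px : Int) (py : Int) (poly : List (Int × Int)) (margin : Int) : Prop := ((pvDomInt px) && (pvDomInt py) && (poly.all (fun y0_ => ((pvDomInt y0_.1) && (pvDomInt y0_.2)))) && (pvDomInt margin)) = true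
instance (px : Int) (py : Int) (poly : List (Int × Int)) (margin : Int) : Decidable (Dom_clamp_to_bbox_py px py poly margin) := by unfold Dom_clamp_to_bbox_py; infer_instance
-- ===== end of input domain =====

-- B replaces A's four min/max extremal scans by sorting each coordinate list once and
-- reading the bbox off the sorted lists' endpoints (objective: alternative algorithm).

-- ===== PORT A =====
-- literal port of A: guard, the two coordinate lists, min/max (via PySem), int() is identity on ints
def clamp_to_bbox_py (px : Int) (py : Int) (poly : List (Int × Int)) (margin : Int) : Int × Int :=
  if poly = [] ∨ poly.length < 3 then (px, py)
  else
    let xs := poly.map (fun p => p.1)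
    let ys := poly.map (fun p => p.2)
    let x0 := (PySem.List.min? xs (fun y => y)).getD 0 + margin
    let x1 := (PySem.List.max? xs (fun y => y)).getD 0 - margin
    let y0 := (PySem.List.min? ys (fun y => y)).getD 0 + margin
    let y1 := (PySem.List.max? ys (fun y => y)).getD 0 - margin
    (max x0 (min x1 px), max y0 (min y1 py))

-- ===== PORT B =====
-- literal port of Source B: sorted coordinate lists, xs[0] and xs[-1] via pyGetD
def clamp_to_bbox_py_alt (px : Int) (py : Int) (poly : List (Int × Int)) (margin : Int) : Int × Int :=
  if poly = [] ∨ poly.length < 3 then (px, py)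
  else
    let xs := PySem.List.sorted (poly.map (fun p => p.1)) (fun y => y) false
    let ys := PySem.List.sorted (poly.map (fun p => p.2)) (fun y => y) false
    (max (PySem.List.pyGetD xs 0 0 + margin) (min (PySem.List.pyGetD xs (-1) 0 - margin) px),
     max (PySem.List.pyGetD ys 0 0 + margin) (min (PySem.List.pyGetD ys (-1) 0 - margin) py))

-- ===== PRECONDITION & SPEC =====
def Spec_clamp_to_bbox_py (px : Int) (py : Int) (poly : List (Int × Int)) (margin : Int) (out : Int × Int) : Prop := out = clamp_to_bbox_py_alt px py poly margin
instance (px : Int) (py : Int) (poly : List (Int × Int)) (margin : Int) (out : Int × Int) : Decidable (Spec_clamp_to_bbox_py px py poly margin out) := by unfold Spec_clamp_to_bbox_py; infer_instance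

-- ===== CLAIM =====
def Claim_equal_clamp_to_bbox_py : Prop := ∀ (px : Int) (py : Int) (poly : List (Int × Int)) (margin : Int), Dom_clamp_to_bbox_py px py poly margin → Spec_clamp_to_bbox_py px py poly margin (clamp_to_bbox_py px py poly margin)

-- ===== LEMMAS AND PROOFS =====

-- head of the sorted list is the minimum value min() finds
lemma pvHeadSorted (xs : List Int) (hne : xs ≠ []) :
    (PySem.List.min? xs (fun y => y)).getD 0
      = PySem.List.pyGetD (PySem.List.sorted xs (fun y => y) false) 0 0 := by
  obtain ⟨m, hm⟩ : ∃ m, PySem.List.min? xs (fun y => y) = some m := by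
    cases h : PySem.List.min? xs (fun y => y) with
    | none => exact absurd ((PySem.List.min?_eq_none_iff xs (fun y => y)).mp h) hne
    | some m => exact ⟨m, rfl⟩
  have hmmem := PySem.List.min?_mem hm
  have hmmin := PySem.List.min?_isMin hm
  cases hs : PySem.List.sorted xs (fun y => y) false with
  | nil => exact absurd ((PySem.List.sorted_eq_nil_iff xs (fun y => y) false).mp hs) hne
  | cons s t =>
      have hsx : s ∈ xs := by
        have : s ∈ PySem.List.sorted xs (fun y => y) false := by
          rw [hs]; exact List.mem_cons_self
        exact (PySem.List.mem_sorted xs (fun y => y) false s).mp this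
      have h1 : s ≤ m := PySem.List.key_head_sorted_le xs (fun y => y) hs m hmmem
      have h2 : m ≤ s := hmmin s hsx
      rw [hm, PySem.List.pyGetD_zero_cons, Option.getD_some]
      omega

-- last of the sorted list is the maximum value max() finds
lemma pvLastSorted (xs : List Int) (hne : xs ≠ []) :
    (PySem.List.max? xs (fun y => y)).getD 0
      = PySem.List.pyGetD (PySem.List.sorted xs (fun y => y) false) (-1) 0 := by
  obtain ⟨M, hM⟩ : ∃ M, PySem.List.max? xs (fun y => y) = some M := by
    cases h : PySem.List.max? xs (fun y => y) with
    | none => exact absurd ((PySem.List.max?_eq_none_iff xs (fun y => y)).mp h) hne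
    | some M => exact ⟨M, rfl⟩
  have hMmem := PySem.List.max?_mem hM
  have hMmax := PySem.List.max?_isMax hM
  have hsne : PySem.List.sorted xs (fun y => y) false ≠ [] := by
    intro h; exact hne ((PySem.List.sorted_eq_nil_iff xs (fun y => y) false).mp h)
  set sxs := PySem.List.sorted xs (fun y => y) false with hsxs
  have hL : sxs.getLast hsne ∈ xs := by
    have := List.getLast_mem hsne
    exact (PySem.List.mem_sorted xs (fun y => y) false _).mp (hsxs ▸ this)
  have h1 : sxs.getLast hsne ≤ M := hMmax _ hL
  have h2 : M ≤ sxs.getLast hsne := by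
    have hMs : M ∈ sxs := (PySem.List.mem_sorted xs (fun y => y) false M).mpr hMmem
    obtain ⟨p, hp, hpe⟩ := List.mem_iff_getElem.mp hMs
    have hlen : 0 < sxs.length := List.length_pos_iff.mpr hsne
    have hlast : sxs.getLast hsne = sxs[sxs.length - 1] := List.getLast_eq_getElem hsne
    have := PySem.List.sorted_id_getElem_mono (xs := xs) (p := p) (q := sxs.length - 1)
      (by omega) (by rw [← hsxs]; omega)
    rw [hlast, ← hpe]
    simpa [← hsxs] using this
  rw [hM, Option.getD_some, PySem.List.pyGetD_neg_one sxs 0 hsne]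
  omega

theorem clamp_to_bbox_py_spec : Claim_equal_clamp_to_bbox_py := by
  intro px py poly margin _
  unfold Spec_clamp_to_bbox_py clamp_to_bbox_py clamp_to_bbox_py_alt
  by_cases h : poly = [] ∨ poly.length < 3
  · simp [h]
  · have hne : poly ≠ [] := by
      intro he; exact h (Or.inl he)
    have hx : poly.map (fun p => p.1) ≠ [] := by simpa using hne
    have hy : poly.map (fun p => p.2) ≠ [] := by simpa using hne
    simp only [if_neg h]
    rw [pvHeadSorted _ hx, pvLastSorted _ hx, pvHeadSorted _ hy, pvLastSorted _ hy]
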